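-- pv_equiv track=rewrite | github.com/sometimes-ayjez/OpenVPN4 | src/opcode_algorithm.py | opcode_fingerprinting
-- ===== SOURCE A (Python) =====
-- XOR_OPCODES_KEY = "xor_opcodes"
--
-- def opcode_fingerprinting(opcodes, params=None):
--     if params is None:
--         params = {}
--     # opcodes is a list of different opcodes
--     if len(opcodes) < 2:
--         return False
--     CR=opcodes[0]
--     SR=opcodes[1]
--
--     if XOR_OPCODES_KEY in params and params[XOR_OPCODES_KEY] and not CR ^ SR in [1^2, 7^8]:
--         return False
--
--     OCSet=set([SR,CR])
--     for opcode in opcodes: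
--         if opcode in [CR, SR] and len(OCSet)>=4:
--             return False
--         OCSet.add(opcode)
--     return 4 <= len(OCSet) <= 10
-- ===== SOURCE B (Python) =====
-- XOR_OPCODES_KEY = "xor_opcodes"
--
-- def opcode_fingerprinting(opcodes, params=None):
--     if len(opcodes) < 2:
--         return False
--     CR = opcodes[0]
--     SR = opcodes[1]
--     if (params or {}).get(XOR_OPCODES_KEY) and (CR ^ SR) not in (1 ^ 2, 7 ^ 8):
--         return False
--     # last position where CR or SR occurs again (position 0 always qualifies)
--     j = max((i for i, op in enumerate(opcodes) if op == CR or op == SR), default=0)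
--     if len({CR, SR}.union(opcodes[:j])) >= 4:
--         return False
--     return 4 <= len(set(opcodes)) <= 10
-- ===== Notes on version B (the rewrite author's own statement) =====
-- stated objective: alternative
-- what changed: A's single early-returning pass that grows a set while checking CR/SR recurrences is replaced by a direct decomposition: find the last index j where one of the first two opcodes recurs, compare the distinct count of the prefix before j against 4 (set-size monotonicity makes the last occurrence the only one that matters), and range-check one distinct count of the whole list.
import Mathlib
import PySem

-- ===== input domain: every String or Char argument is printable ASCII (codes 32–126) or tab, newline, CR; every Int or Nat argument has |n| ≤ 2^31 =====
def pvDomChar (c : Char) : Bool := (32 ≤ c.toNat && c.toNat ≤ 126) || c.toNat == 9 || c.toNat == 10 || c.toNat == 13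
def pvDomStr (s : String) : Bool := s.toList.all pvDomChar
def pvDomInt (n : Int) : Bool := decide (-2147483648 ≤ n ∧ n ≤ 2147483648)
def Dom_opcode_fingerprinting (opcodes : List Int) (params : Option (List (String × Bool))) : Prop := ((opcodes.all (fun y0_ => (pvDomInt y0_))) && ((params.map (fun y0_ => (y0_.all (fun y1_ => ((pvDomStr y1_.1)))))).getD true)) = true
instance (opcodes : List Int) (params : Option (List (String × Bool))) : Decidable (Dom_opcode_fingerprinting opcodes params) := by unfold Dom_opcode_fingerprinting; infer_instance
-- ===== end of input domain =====

-- B replaces A's single early-aborting pass (incremental set with an in-loop size check) by a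
-- direct decomposition: the last index j where the first two opcodes recur, one distinct-count
-- of the prefix before j, and one distinct-count of the whole list (objective: alternative).

-- ===== PORT A =====
-- the 'for opcode in opcodes' loop of A, carrying OCSet
def pvLoopA (CR SR : Int) : List Int → PySem.Set Int → Bool
  | [], s => decide (4 ≤ s.length ∧ s.length ≤ 10)
  | op :: rest, s =>
    if (op = CR ∨ op = SR) ∧ 4 ≤ s.length then false
    else pvLoopA CR SR rest (PySem.Set.add s op)

def opcode_fingerprinting (opcodes : List Int) (params : Option (List (String × Bool))) : Bool :=
  match opcodes with
  | CR :: SR :: _ =>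
    -- 'XOR_OPCODES_KEY in params and params[XOR_OPCODES_KEY]' (params=None → {}): first-match lookup is some true
    if List.lookup "xor_opcodes" (params.getD []) = some true ∧
        ¬ (PySem.Int.bxor CR SR = 3 ∨ PySem.Int.bxor CR SR = 15) then false
    else pvLoopA CR SR opcodes (PySem.Set.ofList [SR, CR])
  | _ => false   -- fewer than two opcodes

-- ===== PORT B =====
def opcode_fingerprinting_alt (opcodes : List Int) (params : Option (List (String × Bool))) : Bool :=
  if opcodes.length < 2 then false
  else
    let CR : Int := PySem.List.pyGetD opcodes 0 0   -- opcodes[0]; in range by the guard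
    let SR : Int := PySem.List.pyGetD opcodes 1 0   -- opcodes[1]; in range by the guard
    -- '(params or {}).get(XOR_OPCODES_KEY)' truthy: first-match lookup is some true
    if List.lookup "xor_opcodes" (params.getD []) = some true ∧
        ¬ (PySem.Int.bxor CR SR = 3 ∨ PySem.Int.bxor CR SR = 15) then false
    else
      -- j = max((i for i, op in enumerate(opcodes) if op == CR or op == SR), default=0)
      let j : Int := PySem.List.maxD
          (((PySem.List.enumerate opcodes).filter
              (fun p => decide (p.2 = CR ∨ p.2 = SR))).map Prod.fst)
          (fun x => x) 0
      if 4 ≤ (PySem.Set.union (PySem.Set.ofList [CR, SR])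
                (PySem.List.slice opcodes none (some j))).length then false
      else decide (4 ≤ (PySem.Set.ofList opcodes).length ∧ (PySem.Set.ofList opcodes).length ≤ 10)

-- ===== PRECONDITION & SPEC =====
def Spec_opcode_fingerprinting (opcodes : List Int) (params : Option (List (String × Bool))) (out : Bool) : Prop := out = opcode_fingerprinting_alt opcodes params
instance (opcodes : List Int) (params : Option (List (String × Bool))) (out : Bool) : Decidable (Spec_opcode_fingerprinting opcodes params out) := by unfold Spec_opcode_fingerprinting; infer_instance

-- ===== CLAIM (what is proved, stated in full; the proofs are below) =====
def Claim_equal_opcode_fingerprinting : Prop := ∀ (opcodes : List Int) (params : Option (List (String × Bool))), Dom_opcode_fingerprinting opcodes params → Spec_opcode_fingerprinting opcodes params (opcode_fingerprinting opcodes params)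

-- ===== LEMMAS AND PROOFS =====

-- two Nodup lists with the same members have the same length
theorem pv_len_congr {s t : List Int} (hs : s.Nodup) (ht : t.Nodup)
    (h : ∀ x, x ∈ s ↔ x ∈ t) : s.length = t.length :=
  ((List.perm_ext_iff_of_nodup hs ht).mpr h).length_eq

theorem pv_len_le_update (t : PySem.Set Int) (l : List Int) :
    t.length ≤ (PySem.Set.update t l).length := by
  rw [PySem.Set.update_eq_append_filter]; simp

theorem pv_update_take_mono (s : PySem.Set Int) (ops : List Int) {i k : Nat} (h : i ≤ k) :
    (PySem.Set.update s (ops.take i)).length ≤ (PySem.Set.update s (ops.take k)).length := by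
  have hk : ops.take k = ops.take i ++ (ops.drop i).take (k - i) := by
    rw [← List.take_add]; congr 1; omega
  rw [hk, PySem.Set.update_append]
  exact pv_len_le_update _ _

-- characterisation of A's loop: it returns true iff no CR/SR occurrence is seen after the
-- distinct count reached 4, and the final distinct count lies in [4, 10]
theorem pvLoopA_true_iff (CR SR : Int) (ops : List Int) (s : PySem.Set Int) :
    pvLoopA CR SR ops s = true ↔
      ((∀ i, (h : i < ops.length) → (ops[i] = CR ∨ ops[i] = SR) →
          (PySem.Set.update s (List.take i ops)).length < 4)
       ∧ 4 ≤ (PySem.Set.update s ops).length ∧ (PySem.Set.update s ops).length ≤ 10) := by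
  induction ops generalizing s with
  | nil => simp [pvLoopA, PySem.Set.update_nil]
  | cons op rest ih =>
    rw [pvLoopA]
    split_ifs with hc
    · simp only [false_iff]
      rintro ⟨h1, _⟩
      have := h1 0 (by simp) (by simpa using hc.1)
      rw [List.take_zero, PySem.Set.update_nil] at this
      omega
    · rw [ih]
      rw [PySem.Set.update_cons s op rest]
      constructor
      · rintro ⟨h1, h2⟩
        refine ⟨?_, h2⟩
        intro i hi hq
        cases i with
        | zero =>
          rw [List.take_zero, PySem.Set.update_nil]
          simp at hq
          by_contra hge
          exact hc ⟨hq, by omega⟩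
        | succ n =>
          have hn : n < rest.length := by simpa using hi
          have := h1 n hn (by simpa using hq)
          rw [List.take_succ_cons, PySem.Set.update_cons]
          exact this
      · rintro ⟨h1, h2⟩
        refine ⟨?_, h2⟩
        intro i hi hq
        have := h1 (i + 1) (by simpa using hi) (by simpa using hq)
        rw [List.take_succ_cons, PySem.Set.update_cons] at this
        exact this

-- membership in B's list of qualifying positions
theorem pv_mem_idxs (CR SR : Int) (ops : List Int) (y : Int) :
    y ∈ ((PySem.List.enumerate ops).filter
          (fun p => decide (p.2 = CR ∨ p.2 = SR))).map Prod.fst ↔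
      ∃ k : Nat, y = (k : Int) ∧ ∃ h : k < ops.length, (ops[k] = CR ∨ ops[k] = SR) := by
  simp only [List.mem_map, List.mem_filter, PySem.List.enumerate_eq_zipIdx_map,
    List.mk_mem_zipIdx_iff_getElem?, Prod.exists, List.getElem?_eq_some_iff]
  constructor
  · rintro ⟨a, b, ⟨⟨x, i, ⟨hlt, rfl⟩, heq⟩, hq⟩, rfl⟩
    cases heq
    exact ⟨i, by simp, hlt, by simpa using hq⟩
  · rintro ⟨k, rfl, hlt, hq⟩
    exact ⟨(k : Int), ops[k], ⟨⟨ops[k], k, ⟨hlt, rfl⟩, by simp⟩, by simpa using hq⟩, rfl⟩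

set_option maxHeartbeats 1000000 in
theorem opcode_fingerprinting_eq (opcodes : List Int) (params : Option (List (String × Bool))) :
    opcode_fingerprinting opcodes params = opcode_fingerprinting_alt opcodes params := by
  rcases opcodes with _ | ⟨CR, _ | ⟨SR, rest⟩⟩
  · rfl
  · rfl
  · have h0 : PySem.List.pyGetD (CR :: SR :: rest) (0 : Int) 0 = CR :=
      PySem.List.pyGetD_zero_cons CR (SR :: rest) 0
    have h1 : PySem.List.pyGetD (CR :: SR :: rest) (1 : Int) 0 = SR := by
      simp [pysem]
    rw [opcode_fingerprinting, opcode_fingerprinting_alt]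
    rw [if_neg (show ¬((CR :: SR :: rest).length < 2) by simp)]
    simp only [h0, h1]
    by_cases hx : List.lookup "xor_opcodes" (params.getD []) = some true ∧
        ¬ (PySem.Int.bxor CR SR = 3 ∨ PySem.Int.bxor CR SR = 15)
    · rw [if_pos hx, if_pos hx]
    rw [if_neg hx, if_neg hx]
    set ops : List Int := CR :: SR :: rest with hops
    set idxs := ((PySem.List.enumerate ops).filter
        (fun p => decide (p.2 = CR ∨ p.2 = SR))).map Prod.fst with hidxs
    set j : Int := PySem.List.maxD idxs (fun x => x) 0 with hj
    -- j is a qualifying position and an upper bound for all of them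
    have h0mem : (0 : Int) ∈ idxs := by
      rw [hidxs, pv_mem_idxs]
      exact ⟨0, by simp, by simp [hops], by simp [hops]⟩
    have hne : idxs ≠ [] := List.ne_nil_of_mem h0mem
    have hjmem : j ∈ idxs := PySem.List.maxD_mem idxs _ 0 hne
    have hjmax : ∀ y ∈ idxs, y ≤ j :=
      PySem.List.max?_id_le (PySem.List.max?_eq_some_maxD idxs (fun x => x) 0 hne)
    obtain ⟨jk, hjk, hjklt, hjq⟩ := (pv_mem_idxs CR SR ops j).mp hjmem
    -- the two seed sets have the same members, so all derived sizes agree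
    have hseedA : (PySem.Set.ofList [SR, CR] : PySem.Set Int).Nodup := PySem.Set.nodup_ofList _
    have hseedB : (PySem.Set.ofList [CR, SR] : PySem.Set Int).Nodup := PySem.Set.nodup_ofList _
    have hlenAB : ∀ l : List Int,
        (PySem.Set.update (PySem.Set.ofList [SR, CR]) l).length
          = (PySem.Set.update (PySem.Set.ofList [CR, SR]) l).length := by
      intro l
      refine pv_len_congr (PySem.Set.nodup_update _ _ hseedA) (PySem.Set.nodup_update _ _ hseedB) ?_
      intro x
      simp only [PySem.Set.mem_update, PySem.Set.mem_ofList, List.mem_cons, List.not_mem_nil]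
      tauto
    -- CR and SR occur in ops, so seeding changes nothing in the final count
    have hK : (PySem.Set.update (PySem.Set.ofList [CR, SR]) ops).length
        = (PySem.Set.ofList ops).length := by
      refine pv_len_congr (PySem.Set.nodup_update _ _ hseedB) (PySem.Set.nodup_ofList _) ?_
      intro x
      simp only [PySem.Set.mem_update, PySem.Set.mem_ofList, List.mem_cons, List.not_mem_nil, hops]
      tauto
    have hslice : PySem.List.slice ops none (some j) = ops.take j.toNat :=
      PySem.List.slice_to ops (by rw [hjk]; exact Int.natCast_nonneg jk)
    have hjtn : j.toNat = jk := by rw [hjk]; exact Int.toNat_natCast jk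
    show pvLoopA CR SR ops (PySem.Set.ofList [SR, CR])
        = if 4 ≤ ((PySem.Set.ofList [CR, SR]).update (PySem.List.slice ops none (some j))).length
          then false
          else decide (4 ≤ (PySem.Set.ofList ops).length ∧ (PySem.Set.ofList ops).length ≤ 10)
    rw [hslice, hjtn, Bool.eq_iff_iff, pvLoopA_true_iff]
    by_cases hcut : 4 ≤ ((PySem.Set.ofList [CR, SR]).update (ops.take jk)).length
    · rw [if_pos hcut]
      simp only [Bool.false_eq_true, iff_false, not_and]
      intro h1
      have hj4 := h1 jk hjklt hjq
      have := hlenAB (List.take jk ops)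
      omega
    · rw [if_neg hcut]
      simp only [decide_eq_true_eq]
      have hMK := hlenAB ops
      constructor
      · rintro ⟨-, h2, h3⟩
        omega
      · rintro ⟨h2, h3⟩
        refine ⟨?_, by omega, by omega⟩
        intro i hi hq
        have hile : (i : Int) ≤ j :=
          hjmax _ ((pv_mem_idxs CR SR ops (i : Int)).mpr ⟨i, rfl, hi, hq⟩)
        have hik : i ≤ jk := by omega
        have hmono := pv_update_take_mono (PySem.Set.ofList [CR, SR]) ops hik
        have := hlenAB (List.take i ops)
        omega

-- ===== VERDICT (by name: the statement is the Claim_ definition above) =====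
theorem opcode_fingerprinting_spec : Claim_equal_opcode_fingerprinting := by
  intro opcodes params _
  unfold Spec_opcode_fingerprinting
  exact opcode_fingerprinting_eq opcodes params
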